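-- pv_equiv track=rewrite | github.com/josecatela/sgcodewars | day41/day41.py | Omar_B_day41
-- ===== SOURCE A (Python) =====
-- def Omar_B_day41(apples):
--     repack=[]
--     output=[]
--     index_bad_apple=-1
--     for i,elt in enumerate(apples):
--         if (0 in elt) and (elt !=[0,0]) and (i != index_bad_apple) :
--             if elt[0] != 0 :
--                 repack.append(elt[0])
--             else :
--                 repack.append(elt[1])
--             i+=1
--             while i<len(apples):
--                 if (0 in apples[i]) and apples[i]!=[0,0] :
--                     index_bad_apple=i
--                     if apples[i][0]!=0 :
--                         repack.append(apples[i][0])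
--                     else :
--                         repack.append(apples[i][1])
--                     output.append(repack)
--                     repack=[]
--                     break
--                 i+=1
--         elif 0 not in elt :
--             output.append(elt)
--     return output
-- ===== SOURCE B (Python) =====
-- def Omar_B_day41(apples):
--     # one pass: collect indices of bad apples (contain a 0 but are not [0,0])
--     bad = [i for i, e in enumerate(apples) if 0 in e and e != [0, 0]]
--     # pair consecutive bad indices; table maps first-of-pair index -> repacked pair
--     pair_at = {}
--     rest = bad
--     while len(rest) >= 2:
--         i, j = rest[0], rest[1]
--         vi = apples[i][0] if apples[i][0] != 0 else apples[i][1]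
--         vj = apples[j][0] if apples[j][0] != 0 else apples[j][1]
--         pair_at[i] = [vi, vj]
--         rest = rest[2:]
--     # emit: full crates unchanged, a repacked pair at each first-of-pair index
--     out = []
--     for i, e in enumerate(apples):
--         if 0 not in e:
--             out.append(e)
--         elif i in pair_at:
--             out.append(pair_at[i])
--     return out
-- ===== Notes on version B (the rewrite author's own statement) =====
-- stated objective: simpler
-- what changed: A pairs bad crates with a nested rescanning while-loop and mutable index_bad_apple/repack state; B first collects the bad-crate indices in one pass, pairs them consecutively into a lookup table keyed by the first index of each pair, then emits the output in a single table-driven pass.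
import Mathlib
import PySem

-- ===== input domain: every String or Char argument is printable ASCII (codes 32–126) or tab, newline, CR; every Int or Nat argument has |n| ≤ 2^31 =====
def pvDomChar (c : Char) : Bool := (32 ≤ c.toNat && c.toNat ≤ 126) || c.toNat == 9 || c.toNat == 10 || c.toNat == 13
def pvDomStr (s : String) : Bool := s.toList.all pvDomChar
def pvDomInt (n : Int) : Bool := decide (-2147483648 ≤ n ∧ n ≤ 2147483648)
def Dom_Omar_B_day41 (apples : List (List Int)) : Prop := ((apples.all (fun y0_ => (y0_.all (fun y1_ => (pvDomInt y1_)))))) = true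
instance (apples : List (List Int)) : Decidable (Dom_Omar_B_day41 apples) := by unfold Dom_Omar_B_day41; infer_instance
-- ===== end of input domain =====

-- B replaces A's nested rescanning loop by one pass that pairs the bad-apple indices
-- into a lookup table followed by one table-driven emission pass (objective: simpler).

-- ===== PORT A =====
-- '0 in elt and elt != [0,0]': a crate with a bad (0) apple, shared verbatim by both programs
def pvBad (e : List Int) : Bool := decide ((0:Int) ∈ e) && decide (e ≠ [0, 0])

-- 'elt[0] if elt[0] != 0 else elt[1]' (both programs); pyGetD is exact on in-range indices,
-- and Pre_ excludes the [0] crates on which Python's elt[1] raises IndexError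
def pvPick (e : List Int) : Int :=
  if PySem.List.pyGetD e (0:Int) 0 ≠ 0 then PySem.List.pyGetD e (0:Int) 0
  else PySem.List.pyGetD e (1:Int) 0

-- A's inner 'while i < len(apples)' scan: first bad crate at index ≥ i, with its picked value
def pvInnerA (apples : List (List Int)) (i : Nat) : Option (Nat × Int) :=
  if h : i < apples.length then
    if pvBad apples[i] then some (i, pvPick apples[i])
    else pvInnerA apples (i + 1)
  else none
termination_by apples.length - i

-- A's outer 'for i, elt in enumerate(apples)' loop with its state (index_bad_apple, repack, output)
def pvOuterA (apples : List (List Int)) (i : Nat) (ibad : Int)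
    (repack : List Int) (output : List (List Int)) : List (List Int) :=
  if h : i < apples.length then
    let e := apples[i]
    if pvBad e ∧ (i : Int) ≠ ibad then
      let repack1 := repack ++ [pvPick e]
      match pvInnerA apples (i + 1) with
      | some (j, v) => pvOuterA apples (i + 1) (j : Int) [] (output ++ [repack1 ++ [v]])
      | none => pvOuterA apples (i + 1) ibad repack1 output
    else if (0:Int) ∈ e then pvOuterA apples (i + 1) ibad repack output
    else pvOuterA apples (i + 1) ibad repack (output ++ [e])
  else output
termination_by apples.length - i

def Omar_B_day41 (apples : List (List Int)) : List (List Int) :=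
  pvOuterA apples 0 (-1) [] []

-- ===== PORT B =====
-- 'bad = [i for i, e in enumerate(apples) if 0 in e and e != [0, 0]]'
def pvBadIdx (apples : List (List Int)) : List Int :=
  ((PySem.List.enumerate apples 0).filter (fun p => pvBad p.2)).map (·.1)

-- the 'while len(rest) >= 2' pairing loop: dict (assoc list) first-of-pair index ↦ repacked pair
def pvPairTable (apples : List (List Int)) : List Int → List (Int × List Int)
  | a :: b :: rest =>
      (a, [pvPick (PySem.List.pyGetD apples a []), pvPick (PySem.List.pyGetD apples b [])])
        :: pvPairTable apples rest
  | _ => []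

def Omar_B_day41_alt (apples : List (List Int)) : List (List Int) :=
  let d := pvPairTable apples (pvBadIdx apples)
  (PySem.List.enumerate apples 0).foldl
    (fun out p =>
      if ¬ ((0:Int) ∈ p.2) then out ++ [p.2]
      else match List.lookup p.1 d with
        | some pr => out ++ [pr]
        | none => out) []

-- ===== PRECONDITION & SPEC =====
-- Pre_ excludes exactly the inputs containing a [0] crate: there Python A raises IndexError
-- (elt[1] on the one-element bad crate), so A returns no value.
def Pre_Omar_B_day41 (apples : List (List Int)) : Prop := [0] ∉ apples
instance (apples : List (List Int)) : Decidable (Pre_Omar_B_day41 apples) := by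
  unfold Pre_Omar_B_day41; infer_instance

def pvWitness_Omar_B_day41 : List (List Int) := [[1, 0], [2, 3], [0, 2]]

def Spec_Omar_B_day41 (apples : List (List Int)) (out : List (List Int)) : Prop :=
  out = Omar_B_day41_alt apples
instance (apples : List (List Int)) (out : List (List Int)) : Decidable (Spec_Omar_B_day41 apples out) := by
  unfold Spec_Omar_B_day41; infer_instance

-- ===== CLAIM (what is proved, stated in full; the proofs are below) =====
def Claim_equal_Omar_B_day41 : Prop :=
  ∀ (apples : List (List Int)), Dom_Omar_B_day41 apples → Pre_Omar_B_day41 apples →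
    Spec_Omar_B_day41 apples (Omar_B_day41 apples)

-- ===== LEMMAS AND PROOFS =====

-- the ordered list of bad-crate indices ≥ i (proof-only midpoint between the two ports)
def pvBadsFrom (apples : List (List Int)) (i : Nat) : List Int :=
  if h : i < apples.length then
    if pvBad apples[i] then (i : Int) :: pvBadsFrom apples (i + 1)
    else pvBadsFrom apples (i + 1)
  else []
termination_by apples.length - i

-- mid-level functional spec of the common output, walking positions with one pending skip
def pvRun (apples : List (List Int)) (i : Nat) (skip : Option Nat) : List (List Int) :=
  if h : i < apples.length then
    if skip = some i then pvRun apples (i + 1) none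
    else
      let e := apples[i]
      if pvBad e then
        match pvInnerA apples (i + 1) with
        | some (j, v) => [pvPick e, v] :: pvRun apples (i + 1) (some j)
        | none => pvRun apples (i + 1) none
      else if (0:Int) ∈ e then pvRun apples (i + 1) skip
      else e :: pvRun apples (i + 1) skip
  else []
termination_by apples.length - i

lemma pvInnerA_none (apples : List (List Int)) (i : Nat) (h : pvInnerA apples i = none) :
    pvBadsFrom apples i = [] := by
  induction i using pvInnerA.induct (apples := apples) with
  | _ => rw [pvInnerA] at h; rw [pvBadsFrom]; simp_all

lemma pvInnerA_some (apples : List (List Int)) (i j : Nat) (v : Int)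
    (h : pvInnerA apples i = some (j, v)) :
    i ≤ j ∧ ∃ hj : j < apples.length, pvBad apples[j] = true ∧ v = pvPick apples[j] ∧
      pvBadsFrom apples i = (j : Int) :: pvBadsFrom apples (j + 1) := by
  induction i using pvInnerA.induct (apples := apples) with
  | case1 x hx hbad =>
    rw [pvInnerA] at h; simp only [hx, dif_pos, if_pos hbad, Option.some.injEq, Prod.mk.injEq] at h
    obtain ⟨rfl, rfl⟩ := h
    exact ⟨le_refl _, hx, hbad, rfl, by rw [pvBadsFrom]; simp [hx, hbad]⟩
  | case2 x hx hbad ih =>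
    rw [pvInnerA] at h; simp only [hx, dif_pos, if_neg hbad] at h
    obtain ⟨h1, h2⟩ := ih h
    exact ⟨by omega, h2.choose, h2.choose_spec.1, h2.choose_spec.2.1,
      by rw [pvBadsFrom]; simp [hx, hbad]; exact h2.choose_spec.2.2⟩
  | case3 x hx => rw [pvInnerA] at h; simp [hx] at h

lemma pvBadsFrom_ge (apples : List (List Int)) (i : Nat) (x : Int)
    (hx : x ∈ pvBadsFrom apples i) : (i : Int) ≤ x := by
  induction i using pvBadsFrom.induct (apples := apples) with
  | case1 j hj hbad ih =>
    rw [pvBadsFrom] at hx; simp only [hj, dif_pos, if_pos hbad, List.mem_cons] at hx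
    rcases hx with rfl | hx
    · exact le_refl _
    · have := ih hx; omega
  | case2 j hj hbad ih =>
    rw [pvBadsFrom] at hx; simp only [hj, dif_pos, if_neg hbad] at hx
    have := ih hx; omega
  | case3 j hj => rw [pvBadsFrom] at hx; simp [hj] at hx

lemma pvPairTable_lookup_mem (apples : List (List Int)) (L : List Int) (x : Int)
    (h : List.lookup x (pvPairTable apples L) ≠ none) : x ∈ L := by
  induction L using pvPairTable.induct with
  | case1 a b rest ih =>
    by_cases hab : a = x
    · exact hab ▸ List.mem_cons_self
    · rw [pvPairTable, List.lookup] at h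
      rw [show (x == a) = false by simp; omega] at h
      exact List.mem_cons_of_mem _ (List.mem_cons_of_mem _ (ih h))
  | case2 l hl =>
    rcases l with _ | ⟨a, _ | ⟨b, t⟩⟩
    · simp [pvPairTable] at h
    · simp [pvPairTable] at h
    · exact absurd rfl (hl a b t)

lemma pvBad_mem {e : List Int} (h : pvBad e = true) : (0:Int) ∈ e := by
  simp [pvBad] at h; exact h.1

lemma pvEnumBads (apples : List (List Int)) : ∀ i : Nat,
    ((PySem.List.enumerate (apples.drop i) (i : Int)).filter (fun p => pvBad p.2)).map (·.1) =
      pvBadsFrom apples i := by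
  intro i
  induction i using pvBadsFrom.induct (apples := apples) with
  | case1 x hx hbad ih =>
    rw [List.drop_eq_getElem_cons hx, PySem.List.enumerate_cons, pvBadsFrom]
    simp only [List.filter_cons, hbad, hx, dif_pos]
    rw [show (x : Int) + 1 = ((x + 1 : Nat) : Int) by push_cast; ring]
    exact congrArg _ ih
  | case2 x hx hbad ih =>
    rw [List.drop_eq_getElem_cons hx, PySem.List.enumerate_cons, pvBadsFrom]
    simp only [List.filter_cons, hbad, hx, dif_pos, Bool.false_eq_true, if_false]
    rw [show (x : Int) + 1 = ((x + 1 : Nat) : Int) by push_cast; ring]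
    exact ih
  | case3 x hx =>
    rw [List.drop_of_length_le (by omega), pvBadsFrom]
    simp [hx, PySem.List.enumerate]

lemma pvLookup_none_of_lt (apples : List (List Int)) (L : List Int) (x : Int)
    (h : ∀ y ∈ L, x < y) : List.lookup x (pvPairTable apples L) = none := by
  by_contra hc
  exact absurd (h x (pvPairTable_lookup_mem apples L x hc)) (lt_irrefl x)

lemma pvBadIdx_eq (apples : List (List Int)) : pvBadIdx apples = pvBadsFrom apples 0 := by
  have h := pvEnumBads apples 0
  simpa [pvBadIdx] using h

-- A's outer loop in the tail with no bad crate left: repack and index_bad_apple are inert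
lemma pvOuterA_noBad (apples : List (List Int)) (i : Nat) (h : pvInnerA apples i = none) :
    ∀ (ibad : Int) (r : List Int) (out : List (List Int)),
      pvOuterA apples i ibad r out = out ++ pvRun apples i none := by
  induction i using pvInnerA.induct (apples := apples) with
  | case1 x hx hbad => rw [pvInnerA] at h; simp [hx, hbad] at h
  | case2 x hx hbad ih =>
    have h1 : pvInnerA apples (x + 1) = none := by
      rw [pvInnerA] at h; simpa [hx, hbad] using h
    intro ibad r out
    rw [pvOuterA, pvRun]
    simp only [hx, dif_pos]
    rw [if_neg (fun hc => hbad hc.1)]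
    rw [if_neg (by simp : ¬ ((none : Option Nat) = some x))]
    rw [if_neg hbad]
    by_cases hz : (0:Int) ∈ apples[x]
    · rw [if_pos hz, if_pos hz]
      exact ih h1 ibad r out
    · rw [if_neg hz, if_neg hz]
      rw [ih h1 ibad r (out ++ [apples[x]])]
      simp
  | case3 x hx =>
    intro ibad r out
    rw [pvOuterA, pvRun]
    simp [hx]

-- A's outer loop computes pvRun
lemma pvOuterA_eq_run (apples : List (List Int)) : ∀ (i : Nat) (ibad : Int) (out : List (List Int)),
    ((i : Int) ≤ ibad → ∃ h : ibad.toNat < apples.length, pvBad apples[ibad.toNat] = true) →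
    pvOuterA apples i ibad [] out =
      out ++ pvRun apples i (if ibad < (i : Int) then none else some ibad.toNat) := by
  intro i
  induction i using pvBadsFrom.induct (apples := apples) with
  | case1 x hx hbad ih =>
    intro ibad out HA
    by_cases heq : (x : Int) = ibad
    · -- the pending second-of-pair index: A's guard fails, pvRun consumes the skip
      rw [show (if ibad < (x:Int) then (none : Option Nat) else some ibad.toNat) = some x
          by rw [if_neg (by omega)]; congr 1; omega]
      rw [pvOuterA, pvRun]
      simp only [hx, dif_pos]
      rw [if_neg (fun hc => hc.2 heq)]
      simp only [if_true]
      rw [if_pos (pvBad_mem hbad)]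
      have := ih ibad out (fun hle => absurd hle (by push_cast; omega))
      rw [if_pos (by push_cast; omega)] at this
      exact this
    · -- a fresh first-of-pair bad crate
      have hsk : (if ibad < (x:Int) then (none : Option Nat) else some ibad.toNat) ≠ some x := by
        split_ifs with hlt
        · simp
        · simp only [ne_eq, Option.some.injEq]; omega
      rw [pvOuterA, pvRun]
      simp only [hx, dif_pos]
      rw [if_pos ⟨hbad, fun hc => heq hc⟩]
      rw [if_neg hsk, if_pos hbad]
      cases hinner : pvInnerA apples (x + 1) with
      | some jv =>
        obtain ⟨j, v⟩ := jv
        obtain ⟨hj1, hj2, hj3, hj4, hj5⟩ := pvInnerA_some apples (x + 1) j v hinner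
        have := ih (j : Int) (out ++ [[pvPick apples[x], v]])
          (fun _ => ⟨by simpa using hj2, by simpa using hj3⟩)
        rw [if_neg (by omega)] at this
        simp only [Int.toNat_natCast] at this
        simp only [List.nil_append, List.singleton_append]
        rw [this, List.append_assoc]
        rfl
      | none =>
        rw [pvOuterA_noBad apples (x + 1) hinner ibad _ out]
  | case2 x hx hbad ih =>
    intro ibad out HA
    have hne : (x : Int) ≠ ibad := by
      intro hc
      obtain ⟨h1, h2⟩ := HA (by omega)
      simp only [show ibad.toNat = x from by omega] at h2
      exact hbad h2
    have hsk : (if ibad < (x:Int) then (none : Option Nat) else some ibad.toNat) =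
        (if ibad < ((x+1:Nat):Int) then (none : Option Nat) else some ibad.toNat) := by
      split_ifs with h1 h2 h3 <;> first | rfl | (exfalso; push_cast at *; omega)
    rw [pvOuterA, pvRun]
    simp only [hx, dif_pos]
    rw [if_neg (fun hc => hbad hc.1)]
    rw [if_neg (by
      split_ifs with hlt
      · simp
      · simp only [ne_eq, Option.some.injEq]; omega : (if ibad < (x:Int) then (none : Option Nat) else some ibad.toNat) ≠ some x)]
    rw [if_neg hbad]
    have HA' : ((x + 1 : Nat) : Int) ≤ ibad → ∃ h : ibad.toNat < apples.length, pvBad apples[ibad.toNat] = true :=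
      fun hle => HA (by push_cast at *; omega)
    by_cases hz : (0:Int) ∈ apples[x]
    · rw [if_pos hz, if_pos hz]
      rw [ih ibad out HA', ← hsk]
    · rw [if_neg hz, if_neg hz]
      rw [ih ibad (out ++ [apples[x]]) HA', ← hsk]
      simp
  | case3 x hx =>
    intro ibad out HA
    rw [pvOuterA, pvRun]
    simp [hx]

-- B's emission pass computes pvRun
def pvTblList (apples : List (List Int)) (i : Nat) : Option Nat → List Int
  | none => pvBadsFrom apples i
  | some s => pvBadsFrom apples (s + 1)

lemma pvEmit_eq_run (apples : List (List Int)) (d : List (Int × List Int)) :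
    ∀ (i : Nat) (skip : Option Nat) (out : List (List Int)),
      (∀ s, skip = some s → ∃ v, pvInnerA apples i = some (s, v)) →
      (∀ x : Int, (i : Int) ≤ x →
        List.lookup x d = List.lookup x (pvPairTable apples (pvTblList apples i skip))) →
      (PySem.List.enumerate (apples.drop i) (i : Int)).foldl
        (fun out p =>
          if ¬ ((0:Int) ∈ p.2) then out ++ [p.2]
          else match List.lookup p.1 d with
            | some pr => out ++ [pr]
            | none => out) out = out ++ pvRun apples i skip := by
  intro i
  induction i using pvBadsFrom.induct (apples := apples) with
  | case1 x hx hbad =>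
    rename_i ih
    intro skip out hskip htbl
    rw [List.drop_eq_getElem_cons hx, PySem.List.enumerate_cons, List.foldl_cons]
    rw [show (x : Int) + 1 = ((x + 1 : Nat) : Int) by push_cast; ring]
    have hbx : pvBadsFrom apples x = (x : Int) :: pvBadsFrom apples (x + 1) := by
      rw [pvBadsFrom]; simp [hx, hbad]
    by_cases hs : skip = some x
    · subst hs
      have hl : List.lookup ((x : Int)) d = none := by
        rw [htbl x (le_refl _)]
        exact pvLookup_none_of_lt apples _ _ (fun y hy => by
          have := pvBadsFrom_ge apples (x + 1) y hy; push_cast at this ⊢; omega)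
      rw [pvRun]
      simp only [hx, dif_pos, if_pos (rfl : (some x : Option Nat) = some x)]
      simp only [if_neg (not_not_intro (pvBad_mem hbad)), hl]
      exact ih none out (by simp) (fun y hy => htbl y (by omega))
    · have hsnone : skip = none := by
        cases skip with
        | none => rfl
        | some s =>
          exfalso
          obtain ⟨v, hv⟩ := hskip s rfl
          rw [pvInnerA] at hv
          simp only [hx, dif_pos, if_pos hbad, Option.some.injEq, Prod.mk.injEq] at hv
          exact hs (by rw [hv.1])
      subst hsnone
      rw [pvRun]
      simp only [hx, dif_pos, if_neg (by simp : ¬ ((none : Option Nat) = some x)), if_pos hbad]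
      cases hinner : pvInnerA apples (x + 1) with
      | some jv =>
        obtain ⟨j, v⟩ := jv
        obtain ⟨hj1, hj2, hj3, hj4, hj5⟩ := pvInnerA_some apples (x + 1) j v hinner
        have hgx : PySem.List.pyGetD apples ((x : Int)) [] = apples[x] := by
          rw [PySem.List.pyGetD_natCast]; exact List.getD_eq_getElem apples [] hx
        have hgj : PySem.List.pyGetD apples ((j : Int)) [] = apples[j] := by
          rw [PySem.List.pyGetD_natCast]; exact List.getD_eq_getElem apples [] hj2
        have hl : List.lookup ((x : Int)) d = some [pvPick apples[x], v] := by
          rw [htbl x (le_refl _)]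
          simp only [pvTblList]
          rw [hbx, hj5, pvPairTable, List.lookup]
          simp [hgx, hgj, hj4]
        simp only [if_neg (not_not_intro (pvBad_mem hbad)), hl]
        have := ih (some j) (out ++ [[pvPick apples[x], v]])
          (fun s hsx => by cases hsx; exact ⟨v, hinner⟩)
          (fun y hy => by
            rw [htbl y (by omega)]
            simp only [pvTblList]
            rw [hbx, hj5, pvPairTable, List.lookup]
            rw [show ((y : Int) == (x : Int)) = false by simp; omega])
        rw [this, List.append_assoc]
        rfl
      | none =>
        have hb1 : pvBadsFrom apples (x + 1) = [] := pvInnerA_none apples (x + 1) hinner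
        have hl : List.lookup ((x : Int)) d = none := by
          rw [htbl x (le_refl _)]
          simp only [pvTblList]
          rw [hbx, hb1]
          rfl
        simp only [if_neg (not_not_intro (pvBad_mem hbad)), hl]
        exact ih none out (by simp)
          (fun y hy => by
            rw [htbl y (by omega)]
            simp only [pvTblList]
            rw [hbx, hb1]
            rfl)
  | case2 x hx hbad =>
    rename_i ih
    intro skip out hskip htbl
    rw [List.drop_eq_getElem_cons hx, PySem.List.enumerate_cons, List.foldl_cons]
    rw [show (x : Int) + 1 = ((x + 1 : Nat) : Int) by push_cast; ring]
    have hbx : pvBadsFrom apples x = pvBadsFrom apples (x + 1) := by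
      rw [pvBadsFrom]; simp [hx, hbad]
    have hskip' : ∀ s, skip = some s → ∃ v, pvInnerA apples (x + 1) = some (s, v) := by
      intro s hsx
      obtain ⟨v, hv⟩ := hskip s hsx
      rw [pvInnerA] at hv
      simp only [hx, dif_pos, if_neg hbad] at hv
      exact ⟨v, hv⟩
    have hs : skip ≠ some x := by
      intro hc
      obtain ⟨v, hv⟩ := hskip x hc
      obtain ⟨q1, q2, q3, q4, q5⟩ := pvInnerA_some apples x x v hv
      exact hbad q3
    have htbl' : ∀ y : Int, ((x + 1 : Nat) : Int) ≤ y →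
        List.lookup y d = List.lookup y (pvPairTable apples (pvTblList apples (x + 1) skip)) := by
      intro y hy
      cases skip with
      | none =>
        rw [htbl y (by push_cast at *; omega)]
        simp only [pvTblList]
        rw [hbx]
      | some s =>
        rw [htbl y (by push_cast at *; omega)]
        rfl
    have hrun : pvRun apples x skip = (if (0:Int) ∈ apples[x] then pvRun apples (x + 1) skip
        else apples[x] :: pvRun apples (x + 1) skip) := by
      rw [pvRun]
      simp only [hx, dif_pos, if_neg hs, if_neg hbad]
    rw [hrun]
    by_cases hz : (0:Int) ∈ apples[x]
    · have hl : List.lookup ((x : Int)) d = none := by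
        cases hskp : skip with
        | none =>
          rw [htbl x (le_refl _), hskp]
          simp only [pvTblList]
          rw [hbx]
          exact pvLookup_none_of_lt apples _ _ (fun y hy => by
            have := pvBadsFrom_ge apples (x + 1) y hy; push_cast at this ⊢; omega)
        | some s =>
          obtain ⟨v, hv⟩ := hskip s hskp
          obtain ⟨hs1, -, -, -, -⟩ := pvInnerA_some apples x s v hv
          rw [htbl x (le_refl _), hskp]
          simp only [pvTblList]
          exact pvLookup_none_of_lt apples _ _ (fun y hy => by
            have := pvBadsFrom_ge apples (s + 1) y hy; push_cast at this ⊢; omega)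
      simp only [if_neg (not_not_intro hz), hl, if_pos hz]
      exact ih skip out hskip' htbl'
    · simp only [if_pos hz, if_neg hz]
      rw [ih skip (out ++ [apples[x]]) hskip' htbl', List.append_assoc]
      rfl
  | case3 x hx =>
    intro skip out hskip htbl
    rw [List.drop_of_length_le (by omega), pvRun]
    simp [hx, PySem.List.enumerate]

-- ===== VERDICT (by name: the statement is the Claim_ definition above) =====
theorem Omar_B_day41_spec : Claim_equal_Omar_B_day41 := by
  intro apples _ _
  unfold Spec_Omar_B_day41 Omar_B_day41 Omar_B_day41_alt
  have hA := pvOuterA_eq_run apples 0 (-1) [] (fun h => absurd h (by omega))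
  rw [if_pos (by omega : (-1 : Int) < ((0 : Nat) : Int))] at hA
  have hB := pvEmit_eq_run apples (pvPairTable apples (pvBadIdx apples)) 0 none []
    (by simp)
    (fun y _ => by rw [pvBadIdx_eq]; rfl)
  simp only [List.drop_zero, Nat.cast_zero, List.nil_append] at hA hB
  rw [hA, ← hB]
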